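-- pv_equiv track=rewrite | github.com/thisprojects/platform-pygame | map_loader.py | _merge_ladders
-- ===== SOURCE A (Python) =====
-- def _merge_ladders(ladder_tiles):
--     """Merge adjacent vertical ladder tiles into taller ladders."""
--     if not ladder_tiles:
--         return []
--
--     # Sort by x, then y (for vertical merging)
--     ladder_tiles.sort(key=lambda p: (p[0], p[1]))
--
--     merged = []
--     current = None
--
--     for x, y, width, height in ladder_tiles:
--         if current is None:
--             current = [x, y, width, height]
--         elif current[0] == x and current[1] + current[3] == y:
--             # Same column and adjacent vertically - extend current ladder downward
--             current[3] += height
--         else: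
--             # Different column or not adjacent - save current and start new
--             merged.append(tuple(current))
--             current = [x, y, width, height]
--
--     # Don't forget the last ladder
--     if current is not None:
--         merged.append(tuple(current))
--
--     return merged
-- ===== SOURCE B (Python) =====
-- def _merge_ladders(ladder_tiles):
--     """Merge adjacent vertical ladder tiles into taller ladders.
--
--     Two staged passes instead of A's running accumulator: (1) partition the
--     sorted tiles into segments, a tile joining the previous segment iff it is
--     vertically flush with the RAW previous tile (same x, prev y + prev h == y);
--     (2) summarize each segment in closed form as (first x, first y, first w,
--     sum of all heights).  This matches A because A's accumulated ladder always
--     ends exactly at the last raw tile's bottom edge.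
--     """
--     ladder_tiles.sort(key=lambda p: (p[0], p[1]))
--     segments = []
--     for t in ladder_tiles:
--         if segments:
--             p = segments[-1][-1]
--             if p[0] == t[0] and p[1] + p[3] == t[1]:
--                 segments[-1].append(t)
--                 continue
--         segments.append([t])
--     return [(s[0][0], s[0][1], s[0][2], sum(t[3] for t in s)) for s in segments]
-- ===== Notes on version B (the rewrite author's own statement) =====
-- stated objective: alternative
-- what changed: A's single pass with a mutating `current` ladder (testing adjacency against the ACCUMULATED height) is replaced by two staged passes: first partition the sorted tiles into segments by a pairwise test on raw neighbouring tiles, then summarize each segment in closed form as (first tile's x,y,w, sum of heights); the equivalence needs the invariant that A's accumulated ladder ends at the last raw tile's bottom edge.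
import Mathlib
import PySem

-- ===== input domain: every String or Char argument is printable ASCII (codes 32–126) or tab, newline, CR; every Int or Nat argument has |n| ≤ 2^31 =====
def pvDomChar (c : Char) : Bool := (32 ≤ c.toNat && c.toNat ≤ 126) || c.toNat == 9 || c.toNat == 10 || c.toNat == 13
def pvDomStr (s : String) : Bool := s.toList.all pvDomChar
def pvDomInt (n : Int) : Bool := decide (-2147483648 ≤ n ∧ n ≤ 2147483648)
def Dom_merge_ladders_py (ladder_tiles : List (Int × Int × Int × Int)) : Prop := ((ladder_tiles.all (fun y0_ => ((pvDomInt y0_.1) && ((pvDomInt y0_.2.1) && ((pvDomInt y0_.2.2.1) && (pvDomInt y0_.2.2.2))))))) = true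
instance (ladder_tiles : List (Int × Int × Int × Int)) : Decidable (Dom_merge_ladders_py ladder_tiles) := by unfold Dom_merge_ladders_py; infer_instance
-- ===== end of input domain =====

-- B replaces A's running-accumulator pass by segment-then-summarize staged passes (objective: alternative).
-- Equivalence is about the RETURN value; both Pythons sort the argument in place identically.

-- ===== PORT A =====
-- A: sort by (x, y), then one flat pass with an optional `current` ladder.
def pvStepA (st : List (Int × Int × Int × Int) × Option (Int × Int × Int × Int))
    (t : Int × Int × Int × Int) : List (Int × Int × Int × Int) × Option (Int × Int × Int × Int) :=
  match st.2 with
  | none => (st.1, some t)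
  | some c =>
    if c.1 = t.1 ∧ c.2.1 + c.2.2.2 = t.2.1 then
      (st.1, some (c.1, c.2.1, c.2.2.1, c.2.2.2 + t.2.2.2))
    else (st.1 ++ [c], some t)

-- flush: append the pending `current` ladder (if any) to `merged`
def pvFlush (st : List (Int × Int × Int × Int) × Option (Int × Int × Int × Int)) :
    List (Int × Int × Int × Int) :=
  match st.2 with
  | none => st.1
  | some c => st.1 ++ [c]

def merge_ladders_py (ladder_tiles : List (Int × Int × Int × Int)) : List (Int × Int × Int × Int) :=
  if ladder_tiles = [] then []
  else
    let s := PySem.List.sorted2 ladder_tiles (fun p => p.1) (fun p => p.2.1)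
    pvFlush (s.foldl pvStepA ([], none))

-- ===== PORT B =====
-- B pass 1 step: `segments[-1][-1]` is the raw previous tile; a tile joins the
-- last segment iff it is flush with THAT tile, else it opens a new segment.
def pvAdj (p t : Int × Int × Int × Int) : Bool :=
  p.1 == t.1 && p.2.1 + p.2.2.2 == t.2.1

def pvStepB (segs : List (List (Int × Int × Int × Int))) (t : Int × Int × Int × Int) :
    List (List (Int × Int × Int × Int)) :=
  match segs.getLast? with
  | some sg =>
    match sg.getLast? with
    | some p => if pvAdj p t then segs.dropLast ++ [sg ++ [t]] else segs ++ [[t]]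
    | none => segs ++ [[t]]   -- unreachable: segments are never empty (Python never builds one)
  | none => segs ++ [[t]]

-- B pass 2: closed-form summary (s[0][0], s[0][1], s[0][2], sum(t[3] for t in s))
def pvSummarize : List (Int × Int × Int × Int) → (Int × Int × Int × Int)
  | [] => (0, 0, 0, 0)   -- unreachable: segments are never empty
  | t :: ts => (t.1, t.2.1, t.2.2.1, (t :: ts).foldl (fun a u => a + u.2.2.2) 0)

def merge_ladders_py_alt (ladder_tiles : List (Int × Int × Int × Int)) : List (Int × Int × Int × Int) :=
  (((PySem.List.sorted2 ladder_tiles (fun p => p.1) (fun p => p.2.1)).foldl pvStepB []).map pvSummarize)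

-- ===== PRECONDITION & SPEC =====
def Spec_merge_ladders_py (ladder_tiles : List (Int × Int × Int × Int)) (out : List (Int × Int × Int × Int)) : Prop := out = merge_ladders_py_alt ladder_tiles
instance (ladder_tiles : List (Int × Int × Int × Int)) (out : List (Int × Int × Int × Int)) : Decidable (Spec_merge_ladders_py ladder_tiles out) := by unfold Spec_merge_ladders_py; infer_instance

-- ===== CLAIM (what is proved, stated in full; the proofs are below) =====
def Claim_equal_merge_ladders_py : Prop := ∀ (ladder_tiles : List (Int × Int × Int × Int)), Dom_merge_ladders_py ladder_tiles → Spec_merge_ladders_py ladder_tiles (merge_ladders_py ladder_tiles)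

-- ===== LEMMAS AND PROOFS =====

-- recursive reading of A's flat pass, from a known current ladder c
def procA (c : Int × Int × Int × Int) : List (Int × Int × Int × Int) → List (Int × Int × Int × Int)
  | [] => [c]
  | t :: ts =>
    if c.1 = t.1 ∧ c.2.1 + c.2.2.2 = t.2.1 then
      procA (c.1, c.2.1, c.2.2.1, c.2.2.2 + t.2.2.2) ts
    else c :: procA t ts

-- recursive reading of B's grouping: (tiles chained onto p, remaining segments)
def pvGrp (p : Int × Int × Int × Int) : List (Int × Int × Int × Int) →
    List (Int × Int × Int × Int) × List (List (Int × Int × Int × Int))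
  | [] => ([], [])
  | t :: ts =>
    let pr := pvGrp t ts
    if pvAdj p t then (t :: pr.1, pr.2) else ([], (t :: pr.1) :: pr.2)

def pvSumH (s : List (Int × Int × Int × Int)) : Int := s.foldl (fun a u => a + u.2.2.2) 0

theorem sumH_init (s : List (Int × Int × Int × Int)) :
    ∀ a : Int, s.foldl (fun a u => a + u.2.2.2) a
      = a + s.foldl (fun a u => a + u.2.2.2) 0 := by
  induction s with
  | nil => intro a; simp
  | cons t ts ih =>
    intro a
    rw [List.foldl_cons, List.foldl_cons, ih (a + t.2.2.2), ih (0 + t.2.2.2)]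
    ring

theorem summarize_cons (t : Int × Int × Int × Int) (g : List (Int × Int × Int × Int)) :
    pvSummarize (t :: g) = (t.1, t.2.1, t.2.2.1, t.2.2.2 + pvSumH g) := by
  simp only [pvSummarize, List.foldl_cons]
  rw [sumH_init]
  simp [pvSumH]

theorem sumH_cons (t : Int × Int × Int × Int) (s : List (Int × Int × Int × Int)) :
    pvSumH (t :: s) = t.2.2.2 + pvSumH s := by
  unfold pvSumH
  rw [List.foldl_cons, sumH_init]
  ring

theorem foldA_eq_procA (l : List (Int × Int × Int × Int)) :
    ∀ (m : List (Int × Int × Int × Int)) (c : Int × Int × Int × Int),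
    pvFlush (l.foldl pvStepA (m, some c)) = m ++ procA c l := by
  induction l with
  | nil => intro m c; simp [procA, pvFlush]
  | cons t ts ih =>
    intro m c
    simp only [List.foldl_cons, pvStepA, procA]
    by_cases h : c.1 = t.1 ∧ c.2.1 + c.2.2.2 = t.2.1
    · simp [h, ih]
    · simp [h, ih, List.append_assoc]

-- A's accumulated test against (c.2.1 + c.2.2.2) coincides with the raw pairwise
-- test against p, whenever c represents a ladder whose last raw tile is p.
theorem procA_eq_grp (l : List (Int × Int × Int × Int)) :
    ∀ (c p : Int × Int × Int × Int), c.1 = p.1 → c.2.1 + c.2.2.2 = p.2.1 + p.2.2.2 →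
    procA c l = (c.1, c.2.1, c.2.2.1, c.2.2.2 + pvSumH (pvGrp p l).1) ::
                (pvGrp p l).2.map pvSummarize := by
  induction l with
  | nil => intro c p _ _; simp [procA, pvGrp, pvSumH]
  | cons t ts ih =>
    intro c p hx hy
    have hiff : (c.1 = t.1 ∧ c.2.1 + c.2.2.2 = t.2.1) ↔ pvAdj p t = true := by
      simp [pvAdj, hx, ← hy]
    by_cases h : c.1 = t.1 ∧ c.2.1 + c.2.2.2 = t.2.1
    · have hb : pvAdj p t = true := hiff.mp h
      simp only [procA, if_pos h, pvGrp, hb, if_true]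
      have h2 : c.2.1 + (c.2.2.2 + t.2.2.2) = t.2.1 + t.2.2.2 := by
        have := h.2; omega
      rw [ih (c.1, c.2.1, c.2.2.1, c.2.2.2 + t.2.2.2) t h.1 h2]
      simp [sumH_cons]; ring
    · have hb : pvAdj p t = false := by
        cases hb' : pvAdj p t with
        | false => rfl
        | true => exact absurd (hiff.mpr hb') h
      simp only [procA, if_neg h, pvGrp, hb, Bool.false_eq_true, if_false]
      rw [ih t t rfl rfl, ← summarize_cons]
      simp [pvSumH]

-- B's foldl (append to the last segment / open a new one) computes pvGrp
theorem foldB_eq_grp (l : List (Int × Int × Int × Int)) :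
    ∀ (acc : List (List (Int × Int × Int × Int))) (pre : List (Int × Int × Int × Int))
      (p : Int × Int × Int × Int),
    l.foldl pvStepB (acc ++ [pre ++ [p]]) =
      acc ++ ((pre ++ [p]) ++ (pvGrp p l).1) :: (pvGrp p l).2 := by
  induction l with
  | nil => intro acc pre p; simp [pvGrp]
  | cons t ts ih =>
    intro acc pre p
    have h1 : (acc ++ [pre ++ [p]]).getLast? = some (pre ++ [p]) := List.getLast?_concat
    have h2 : (pre ++ [p]).getLast? = some p := List.getLast?_concat
    simp only [List.foldl_cons, pvStepB, h1, h2]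
    by_cases hb : pvAdj p t = true
    · rw [if_pos hb]
      have h3 : (acc ++ [pre ++ [p]]).dropLast = acc := by
        simpa using List.dropLast_concat (l := acc) (b := pre ++ [p])
      rw [h3, ih acc (pre ++ [p]) t]
      simp only [pvGrp, hb, if_true]
      simp [List.append_assoc]
    · rw [if_neg hb]
      rw [show (acc ++ [pre ++ [p]] ++ [[t]]) = (acc ++ [pre ++ [p]]) ++ [([] : List (Int × Int × Int × Int)) ++ [t]] from by simp]
      rw [ih (acc ++ [pre ++ [p]]) [] t]
      simp only [pvGrp]
      rw [if_neg (by simpa using hb)]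
      simp

-- the two staged programs agree on any already-sorted input list
theorem flush_eq_segs (s : List (Int × Int × Int × Int)) :
    pvFlush (s.foldl pvStepA ([], none)) = (s.foldl pvStepB []).map pvSummarize := by
  cases s with
  | nil => simp [pvFlush]
  | cons c rest =>
    have hA : (c :: rest).foldl pvStepA ([], none) = rest.foldl pvStepA ([], some c) := by
      simp [pvStepA]
    have hB : (c :: rest).foldl pvStepB [] = rest.foldl pvStepB ([] ++ [[] ++ [c]]) := by
      simp [pvStepB]
    rw [hA, hB, foldA_eq_procA rest [] c, foldB_eq_grp rest [] [] c,
        procA_eq_grp rest c c rfl rfl]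
    simp [summarize_cons]

-- ===== VERDICT (by name: the statement is the Claim_ definition above) =====
theorem merge_ladders_py_spec : Claim_equal_merge_ladders_py := by
  intro l _
  unfold Spec_merge_ladders_py merge_ladders_py merge_ladders_py_alt
  by_cases h : l = []
  · subst h
    have h0 : PySem.List.sorted2 ([] : List (Int × Int × Int × Int))
        (fun p => p.1) (fun p => p.2.1) = [] :=
      List.perm_nil.mp (PySem.List.sorted2_perm _ _ _ _)
    rw [h0]
    simp
  · simp only [if_neg h]
    rw [flush_eq_segs]
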